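-- pv_equiv track=rewrite | github.com/Alvaropz/Python_problems_BinarySearch | 1. Easy/shortest_sublist_with_max_frequency/shortest_sublist_with_max_frequency.py | shortest_sublist_with_max_frequency
-- ===== SOURCE A (Python) =====
-- from collections import Counter
--
-- def shortest_sublist_with_max_frequency(nums):
--     dict_counting = Counter(nums)
--     k = max(dict_counting.values())
--     most_frequent = {key: val for key, val in dict_counting.items() if val == k}
--     list_keys = list(most_frequent)
--     range_indexes = []
--     for value in list_keys:
--         last_index = len(nums) - nums[::-1].index(value)
--         range_indexes.append(last_index - nums.index(value))
--     return min(range_indexes)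
-- ===== SOURCE B (Python) =====
-- def shortest_sublist_with_max_frequency(nums):
--     # one pass: per value keep (count, first index, last index); then one scan
--     stats = {}
--     for i, v in enumerate(nums):
--         if v in stats:
--             c, f, _ = stats[v]
--             stats[v] = (c + 1, f, i)
--         else:
--             stats[v] = (1, i, i)
--     best_count, best_span = 0, 0
--     for c, f, l in stats.values():
--         span = l - f + 1
--         if c > best_count or (c == best_count and span < best_span):
--             best_count, best_span = c, span
--     return best_span
-- ===== Notes on version B (the rewrite author's own statement) =====
-- stated objective: alternative
-- what changed: Replaces Counter plus per-key forward and reversed .index scans with a single pass storing (count, first index, last index) per value in a dict, then one scan over those triples keeping the best (max count, min span); O(n) vs O(n*u), though a timing run did not confirm a speed-up on the duplicate-heavy timed inputs.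
import Mathlib
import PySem

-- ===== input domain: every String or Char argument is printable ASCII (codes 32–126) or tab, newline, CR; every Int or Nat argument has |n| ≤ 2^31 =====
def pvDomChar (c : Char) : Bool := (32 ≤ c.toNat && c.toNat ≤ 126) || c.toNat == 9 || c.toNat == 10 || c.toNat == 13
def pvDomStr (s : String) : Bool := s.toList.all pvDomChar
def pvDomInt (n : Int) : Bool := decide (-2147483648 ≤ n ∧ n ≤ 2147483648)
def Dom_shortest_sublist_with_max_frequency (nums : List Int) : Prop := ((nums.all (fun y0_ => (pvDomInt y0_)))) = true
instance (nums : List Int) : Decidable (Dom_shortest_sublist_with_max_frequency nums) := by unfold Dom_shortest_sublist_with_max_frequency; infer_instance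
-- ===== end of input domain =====

-- B replaces A's Counter + per-key forward/reversed .index scans by one pass storing
-- (count, first, last) per value and one scan for the best pair (alternative algorithm).

-- ===== PORT A =====
def shortest_sublist_with_max_frequency (nums : List Int) : Int :=
  let dict_counting := PySem.Dict.counter nums
  let k := (PySem.List.max? dict_counting.values (fun x => x)).getD 0
  let most_frequent := dict_counting.items.foldl
    (fun d p => if p.2 == k then d.insert p.1 p.2 else d) PySem.Dict.empty
  let list_keys := most_frequent.keys
  let range_indexes := list_keys.foldl
    (fun acc value =>
      let last_index : Int := (nums.length : Int) -
        (((PySem.List.index? ((PySem.List.slice? nums none none (-1)).getD []) value).getD 0 : Nat) : Int)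
      acc ++ [last_index - (((PySem.List.index? nums value).getD 0 : Nat) : Int)]) []
  (PySem.List.min? range_indexes (fun x => x)).getD 0

-- ===== PORT B =====
def shortest_sublist_with_max_frequency_alt (nums : List Int) : Int :=
  let stats := (PySem.List.enumerate nums 0).foldl
    (fun d p => d.insert p.2
      (if d.contains p.2 then
        (let t := d.getD p.2 (0, 0, 0); (t.1 + 1, t.2.1, p.1))
       else (1, p.1, p.1)))
    (PySem.Dict.empty : PySem.Dict Int (Int × Int × Int))
  let best := stats.values.foldl
    (fun bb t =>
      let span : Int := t.2.2 - t.2.1 + 1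
      if t.1 > bb.1 || (t.1 == bb.1 && span < bb.2) then (t.1, span) else bb)
    ((0 : Int), (0 : Int))
  best.2

-- ===== PRECONDITION & SPEC =====
-- A raises ValueError (max() of an empty sequence) on the empty list; Pre_ excludes it.
def Pre_shortest_sublist_with_max_frequency (nums : List Int) : Prop := nums ≠ []
instance (nums : List Int) : Decidable (Pre_shortest_sublist_with_max_frequency nums) := by
  unfold Pre_shortest_sublist_with_max_frequency; infer_instance
def pvWitness_shortest_sublist_with_max_frequency : List Int := [1, 2, 2, 3]

def Spec_shortest_sublist_with_max_frequency (nums : List Int) (out : Int) : Prop :=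
  out = shortest_sublist_with_max_frequency_alt nums
instance (nums : List Int) (out : Int) : Decidable (Spec_shortest_sublist_with_max_frequency nums out) := by
  unfold Spec_shortest_sublist_with_max_frequency; infer_instance

-- ===== CLAIM (what is proved, stated in full; the proofs are below) =====
def Claim_equal_shortest_sublist_with_max_frequency : Prop :=
  ∀ (nums : List Int), Dom_shortest_sublist_with_max_frequency nums →
    Pre_shortest_sublist_with_max_frequency nums →
    Spec_shortest_sublist_with_max_frequency nums (shortest_sublist_with_max_frequency nums)
-- ===== LEMMAS AND PROOFS =====

-- the (count, first index, last index) triple kept per value, expressed through A's primitives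
def pvStat (nums : List Int) (v : Int) : Int × Int × Int :=
  ((List.count v nums : Int),
   (((PySem.List.index? nums v).getD 0 : Nat) : Int),
   (nums.length : Int) - 1 - (((PySem.List.index? nums.reverse v).getD 0 : Nat) : Int))

def pvUpd (d : PySem.Dict Int (Int × Int × Int)) (p : Int × Int) : PySem.Dict Int (Int × Int × Int) :=
  d.insert p.2
    (if d.contains p.2 then
      (let t := d.getD p.2 (0, 0, 0); (t.1 + 1, t.2.1, p.1))
     else (1, p.1, p.1))

def pvStats (nums : List Int) : PySem.Dict Int (Int × Int × Int) :=
  (PySem.List.enumerate nums 0).foldl pvUpd PySem.Dict.empty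

def pvStep (bb : Int × Int) (t : Int × Int × Int) : Int × Int :=
  let span : Int := t.2.2 - t.2.1 + 1
  if t.1 > bb.1 || (t.1 == bb.1 && span < bb.2) then (t.1, span) else bb

def pvL (nums : List Int) : List (Int × Int × Int) :=
  (PySem.Set.ofList nums).map (pvStat nums)

def pvK (L : List (Int × Int × Int)) : Int :=
  (PySem.List.max? (L.map (fun t => t.1)) (fun x => x)).getD 0

def pvM (L : List (Int × Int × Int)) : Int :=
  (PySem.List.min?
    ((L.filter (fun t => t.1 == pvK L)).map (fun t => t.2.2 - t.2.1 + 1)) (fun x => x)).getD 0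

theorem pvStats_append (l : List Int) (x : Int) :
    pvStats (l ++ [x]) = pvUpd (pvStats l) ((l.length : Int), x) := by
  unfold pvStats
  rw [PySem.List.enumerate_append, List.foldl_append]
  simp [PySem.List.enumerate_cons, PySem.List.enumerate_nil]

theorem pvStats_get? (nums : List Int) (v : Int) :
    (pvStats nums).get? v = if v ∈ nums then some (pvStat nums v) else none := by
  induction nums using List.reverseRecOn with
  | nil => simp [pvStats, PySem.List.enumerate_nil, PySem.Dict.get?_empty]
  | append_singleton l x ih =>
    rw [pvStats_append]
    unfold pvUpd
    by_cases hv : v = x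
    · subst hv
      rw [PySem.Dict.get?_insert_self]
      rw [PySem.Dict.contains_eq_isSome_get?, PySem.Dict.getD_eq_get?_getD, ih]
      by_cases hm : v ∈ l
      · simp only [hm, if_pos, Option.isSome_some, Option.getD_some, if_true,
          List.mem_append, List.mem_singleton, true_or]
        have hrev : (l ++ [v]).reverse = v :: l.reverse := by simp
        have h1 : PySem.List.index? (l ++ [v]) v = PySem.List.index? l v :=
          PySem.List.index?_append_of_mem _ hm
        have h2 : PySem.List.index? ((l ++ [v]).reverse) v = some 0 := by
          rw [hrev, PySem.List.index?_cons_self]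
        simp only [pvStat, h1, h2, List.count_append, List.length_append,
          Option.some.injEq, Prod.mk.injEq, Option.getD_some, List.count_singleton,
          List.length_singleton, beq_self_eq_true, if_true]
        push_cast
        and_intros <;> first | trivial | omega
      · simp only [hm, if_neg, if_false, Option.isSome_none, Bool.false_eq_true,
          List.mem_append, List.mem_singleton, or_true, if_true, reduceCtorEq]
        have h1 : PySem.List.index? (l ++ [v]) v = some l.length :=
          PySem.List.index?_append_singleton_self l v hm
        have h2 : PySem.List.index? ((l ++ [v]).reverse) v = some 0 := by
          have hrev : (l ++ [v]).reverse = v :: l.reverse := by simp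
          rw [hrev, PySem.List.index?_cons_self]
        have hc : List.count v l = 0 := List.count_eq_zero.mpr hm
        simp only [pvStat, h1, h2, List.count_append, hc, List.count_singleton,
          List.length_append, List.length_singleton, Option.some.injEq, Prod.mk.injEq,
          Option.getD_some, beq_self_eq_true, if_true]
        push_cast
        and_intros <;> first | trivial | omega
    · rw [PySem.Dict.get?_insert_of_ne _ _ hv, ih]
      by_cases hm : v ∈ l
      · have hml : v ∈ l ++ [x] := List.mem_append_left _ hm
        simp only [hm, hml, if_true]
        have h1 : PySem.List.index? (l ++ [x]) v = PySem.List.index? l v :=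
          PySem.List.index?_append_of_mem _ hm
        have hrev : (l ++ [x]).reverse = x :: l.reverse := by simp
        obtain ⟨j, hj⟩ : ∃ j, PySem.List.index? l.reverse v = some j := by
          have := (PySem.List.index?_isSome_iff l.reverse v).mpr (by simpa using hm)
          exact Option.isSome_iff_exists.mp this
        have h2 : PySem.List.index? ((l ++ [x]).reverse) v = some (j + 1) := by
          rw [hrev, PySem.List.index?_cons_of_ne _ (fun h => hv h.symm), hj]; rfl
        have hcx : List.count v [x] = 0 := by
          simp [List.count_singleton]; exact fun h => hv h.symm
        simp only [pvStat, h1, h2, hj, List.count_append, List.length_append, hcx,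
          List.length_singleton, Option.some.injEq, Prod.mk.injEq, Option.getD_some]
        push_cast
        and_intros <;> first | trivial | omega
      · have hml : v ∉ l ++ [x] := by
          simp only [List.mem_append, List.mem_singleton]
          push_neg; exact ⟨hm, hv⟩
        simp [hm, hml]

theorem pvStats_keys (nums : List Int) : (pvStats nums).keys = PySem.Set.ofList nums := by
  have h : (pvStats nums).keys
      = PySem.Set.update (PySem.Dict.empty : PySem.Dict Int (Int × Int × Int)).keys
          ((PySem.List.enumerate nums 0).map (fun p => p.2)) :=
    PySem.Dict.keys_foldl_insert_key (PySem.List.enumerate nums 0) (fun p => p.2)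
      (fun d p => if d.contains p.2 then
          (let t := d.getD p.2 ((0:Int), (0:Int), (0:Int)); (t.1 + 1, t.2.1, p.1))
        else (1, p.1, p.1)) PySem.Dict.empty
  rw [h, PySem.List.map_snd_enumerate, PySem.Dict.keys_empty]
  rfl

theorem pvStats_nodup_keys (nums : List Int) : (pvStats nums).keys.Nodup := by
  rw [pvStats_keys]; exact PySem.Set.nodup_ofList nums

theorem pvStats_values (nums : List Int) :
    (pvStats nums).values = pvL nums := by
  rw [PySem.Dict.values_eq_map_keys _ (pvStats_nodup_keys nums) ((0:Int), (0:Int), (0:Int)),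
    pvStats_keys]
  unfold pvL
  refine List.map_congr_left (fun v hv => ?_)
  have hm : v ∈ nums := (PySem.Set.mem_ofList nums v).mp hv
  rw [PySem.Dict.getD_eq_get?_getD, pvStats_get?, if_pos hm, Option.getD_some]

-- the port of B is the pvStep fold over pvL
theorem portB_eq (nums : List Int) :
    shortest_sublist_with_max_frequency_alt nums = ((pvL nums).foldl pvStep (0, 0)).2 := by
  have h : shortest_sublist_with_max_frequency_alt nums
      = (((pvStats nums).values).foldl pvStep (0, 0)).2 := rfl
  rw [h, pvStats_values]

-- max/min of a list via max?/min? behave on singletons and right-appends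
theorem pvMax_singleton (x : Int) : (PySem.List.max? [x] (fun y => y)).getD 0 = x := by
  rw [PySem.List.max?_id_cons]; simp

theorem pvMin_singleton (x : Int) : (PySem.List.min? [x] (fun y => y)).getD 0 = x := by
  rw [PySem.List.min?_id_cons]; simp

theorem pvMax_append (xs : List Int) (x : Int) (h : xs ≠ []) :
    (PySem.List.max? (xs ++ [x]) (fun y => y)).getD 0
      = max ((PySem.List.max? xs (fun y => y)).getD 0) x := by
  obtain ⟨h0, t, rfl⟩ := List.exists_cons_of_ne_nil h
  rw [List.cons_append, PySem.List.max?_id_cons, PySem.List.max?_id_cons, List.foldl_append]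
  simp

theorem pvMin_append (xs : List Int) (x : Int) (h : xs ≠ []) :
    (PySem.List.min? (xs ++ [x]) (fun y => y)).getD 0
      = min ((PySem.List.min? xs (fun y => y)).getD 0) x := by
  obtain ⟨h0, t, rfl⟩ := List.exists_cons_of_ne_nil h
  rw [List.cons_append, PySem.List.min?_id_cons, PySem.List.min?_id_cons, List.foldl_append]
  simp

theorem pvK_le (L : List (Int × Int × Int)) (t : Int × Int × Int) (ht : t ∈ L) :
    t.1 ≤ pvK L := by
  obtain ⟨m, hm⟩ : ∃ m, PySem.List.max? (L.map (fun t => t.1)) (fun x => x) = some m := by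
    cases hmx : PySem.List.max? (L.map (fun t => t.1)) (fun x => x) with
    | none =>
      rw [PySem.List.max?_eq_none_iff, List.map_eq_nil_iff] at hmx
      subst hmx
      exact absurd ht (List.not_mem_nil)
    | some m => exact ⟨m, rfl⟩
  have := PySem.List.max?_isMax hm t.1 (List.mem_map_of_mem ht)
  simpa [pvK, hm] using this

theorem pvK_mem (L : List (Int × Int × Int)) (h : L ≠ []) :
    ∃ t ∈ L, t.1 = pvK L := by
  obtain ⟨m, hm⟩ : ∃ m, PySem.List.max? (L.map (fun t => t.1)) (fun x => x) = some m := by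
    cases hmx : PySem.List.max? (L.map (fun t => t.1)) (fun x => x) with
    | none =>
      rw [PySem.List.max?_eq_none_iff, List.map_eq_nil_iff] at hmx
      exact absurd hmx h
    | some m => exact ⟨m, rfl⟩
  have hmem := PySem.List.max?_mem hm
  obtain ⟨t, ht, htm⟩ := List.mem_map.mp hmem
  exact ⟨t, ht, by simp [pvK, hm, htm]⟩

theorem pvK_append (L : List (Int × Int × Int)) (t : Int × Int × Int) (h : L ≠ []) :
    pvK (L ++ [t]) = max (pvK L) t.1 := by
  unfold pvK
  rw [List.map_append]
  exact pvMax_append _ _ (by simpa using h)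

-- the one-scan best fold computes (max count, min span among max-count entries)
theorem pvBestFold : ∀ (L : List (Int × Int × Int)), L ≠ [] → (∀ t ∈ L, 1 ≤ t.1) →
    L.foldl pvStep (0, 0) = (pvK L, pvM L) := by
  intro L
  induction L using List.reverseRecOn with
  | nil => intro h; exact absurd rfl h
  | append_singleton l t ih =>
    intro _ hc
    by_cases hl : l = []
    · subst hl
      have ht1 : (1 : Int) ≤ t.1 := hc t (by simp)
      simp only [List.nil_append, List.foldl_cons, List.foldl_nil]
      have hcond : pvStep (0, 0) t = (t.1, t.2.2 - t.2.1 + 1) := by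
        unfold pvStep
        simp only []
        rw [if_pos]
        simp only [gt_iff_lt, Bool.or_eq_true, decide_eq_true_eq]
        left; omega
      rw [hcond]
      have hK : pvK [t] = t.1 := by
        unfold pvK; simp only [List.map_cons, List.map_nil]; exact pvMax_singleton t.1
      have hM : pvM [t] = t.2.2 - t.2.1 + 1 := by
        unfold pvM
        rw [hK]
        simp only [List.filter_cons, beq_self_eq_true, if_true, List.filter_nil,
          List.map_cons, List.map_nil, decide_true]
        exact pvMin_singleton _
      rw [hK, hM]
    · rw [List.foldl_append, ih hl (fun s hs => hc s (List.mem_append_left _ hs))]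
      simp only [List.foldl_cons, List.foldl_nil]
      have hKapp := pvK_append l t hl
      rcases lt_trichotomy (pvK l) t.1 with hlt | heq | hgt
      · -- new strict maximum: only t attains it
        have hK : pvK (l ++ [t]) = t.1 := by rw [hKapp]; omega
        have hfilter : (l ++ [t]).filter (fun s => s.1 == pvK (l ++ [t])) = [t] := by
          rw [hK, List.filter_append]
          have h1 : l.filter (fun s => s.1 == t.1) = [] := by
            rw [List.filter_eq_nil_iff]
            intro s hs
            have := pvK_le l s hs
            simp only [beq_iff_eq]; omega
          simp [h1]
        have hM : pvM (l ++ [t]) = t.2.2 - t.2.1 + 1 := by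
          unfold pvM
          rw [hfilter]
          simp only [List.map_cons, List.map_nil]
          exact pvMin_singleton _
        have hstep : pvStep (pvK l, pvM l) t = (t.1, t.2.2 - t.2.1 + 1) := by
          unfold pvStep
          rw [if_pos]
          simp only [gt_iff_lt, Bool.or_eq_true, decide_eq_true_eq]
          left; exact hlt
        rw [hstep, hK, hM]
      · -- ties the maximum: span min gets updated
        have hK : pvK (l ++ [t]) = pvK l := by rw [hKapp]; omega
        have hfilter : (l ++ [t]).filter (fun s => s.1 == pvK (l ++ [t]))
            = l.filter (fun s => s.1 == pvK l) ++ [t] := by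
          rw [hK, List.filter_append]
          simp [heq]
        have hfne : l.filter (fun s => s.1 == pvK l) ≠ [] := by
          obtain ⟨s, hs, hs1⟩ := pvK_mem l hl
          intro hnil
          have : s ∈ l.filter (fun s => s.1 == pvK l) :=
            List.mem_filter.mpr ⟨hs, by simp [hs1]⟩
          rw [hnil] at this; exact absurd this (List.not_mem_nil)
        have hM : pvM (l ++ [t]) = min (pvM l) (t.2.2 - t.2.1 + 1) := by
          unfold pvM
          rw [hfilter, List.map_append]
          simp only [List.map_cons, List.map_nil]
          exact pvMin_append _ _ (by simpa using hfne)
        have hstep : pvStep (pvK l, pvM l) t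
            = (pvK l, min (pvM l) (t.2.2 - t.2.1 + 1)) := by
          unfold pvStep
          simp only [gt_iff_lt, Bool.or_eq_true, Bool.and_eq_true, decide_eq_true_eq,
            beq_iff_eq]
          split_ifs with h
          · rcases h with h | ⟨_, h⟩
            · omega
            · have hmin : min (pvM l) (t.2.2 - t.2.1 + 1) = t.2.2 - t.2.1 + 1 := by omega
              rw [hmin, heq]
          · push_neg at h
            have h2 := h.2 heq.symm
            have hmin : min (pvM l) (t.2.2 - t.2.1 + 1) = pvM l := by omega
            rw [hmin]
        rw [hstep, hK, hM]
      · -- below the maximum: nothing changes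
        have hK : pvK (l ++ [t]) = pvK l := by rw [hKapp]; omega
        have hfilter : (l ++ [t]).filter (fun s => s.1 == pvK (l ++ [t]))
            = l.filter (fun s => s.1 == pvK l) := by
          rw [hK, List.filter_append]
          have : List.filter (fun s => s.1 == pvK l) [t] = [] := by
            simp only [List.filter_cons, List.filter_nil, beq_iff_eq]
            rw [if_neg (by omega : ¬ t.1 = pvK l)]
          simp [this]
        have hM : pvM (l ++ [t]) = pvM l := by unfold pvM; rw [hfilter]
        have hstep : pvStep (pvK l, pvM l) t = (pvK l, pvM l) := by
          unfold pvStep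
          rw [if_neg]
          simp only [gt_iff_lt, Bool.or_eq_true, Bool.and_eq_true, decide_eq_true_eq,
            beq_iff_eq]
          push_neg
          exact ⟨by omega, fun h => absurd h (by omega)⟩
        rw [hstep, hK, hM]

-- the port of A computes pvM of the same list
theorem portA_eq (nums : List Int) :
    shortest_sublist_with_max_frequency nums = pvM (pvL nums) := by
  unfold shortest_sublist_with_max_frequency
  simp only []
  -- k = pvK (pvL nums)
  have hvals : (PySem.Dict.counter nums).values
      = (PySem.Set.ofList nums).map (fun k => (List.count k nums : Int)) := by
    show ((PySem.Dict.counter nums).items).map (fun p => p.2) = _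
    rw [PySem.Dict.items_counter, List.map_map]
    rfl
  have hLmap : (pvL nums).map (fun t => t.1)
      = (PySem.Set.ofList nums).map (fun k => (List.count k nums : Int)) := by
    unfold pvL
    rw [List.map_map]
    rfl
  have hk : (PySem.List.max? (PySem.Dict.counter nums).values (fun x => x)).getD 0
      = pvK (pvL nums) := by
    unfold pvK; rw [hvals, hLmap]
  rw [hk]
  -- most_frequent and its keys
  set K := pvK (pvL nums) with hKdef
  have hfold : (PySem.Dict.counter nums).items.foldl
      (fun d (p : Int × Int) => if p.2 == K then d.insert p.1 p.2 else d) PySem.Dict.empty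
      = ((PySem.Dict.counter nums).items.filter (fun p => p.2 == K)).foldl
          (fun d (p : Int × Int) => d.insert p.1 p.2) PySem.Dict.empty :=
    PySem.List.foldl_if_eq_foldl_filter _ _ _ _
  have hfiltitems : (PySem.Dict.counter nums).items.filter (fun p => p.2 == K)
      = ((PySem.Set.ofList nums).filter (fun v => (List.count v nums : Int) == K)).map
          (fun v => (v, (List.count v nums : Int))) := by
    rw [PySem.Dict.items_counter, List.filter_map]
    rfl
  have hnodupkeys : (((PySem.Set.ofList nums).filter
      (fun v => (List.count v nums : Int) == K)).map
        (fun v => (v, (List.count v nums : Int)))).map (fun p : Int × Int => p.1)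
      = (PySem.Set.ofList nums).filter (fun v => (List.count v nums : Int) == K) := by
    rw [List.map_map]; simp [Function.comp_def]
  have hkeys : ((PySem.Dict.counter nums).items.foldl
      (fun d (p : Int × Int) => if p.2 == K then d.insert p.1 p.2 else d)
        PySem.Dict.empty).keys
      = (PySem.Set.ofList nums).filter (fun v => (List.count v nums : Int) == K) := by
    rw [hfold, hfiltitems]
    have hfresh : ∀ a ∈ ((PySem.Set.ofList nums).filter
        (fun v => (List.count v nums : Int) == K)).map
          (fun v => (v, (List.count v nums : Int))),
        (PySem.Dict.empty : PySem.Dict Int Int).contains a.1 = false := by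
      intro a _; exact PySem.Dict.contains_empty a.1
    have hnd : (((PySem.Set.ofList nums).filter
        (fun v => (List.count v nums : Int) == K)).map
          (fun v => (v, (List.count v nums : Int)))).map (fun p : Int × Int => p.1)
        |>.Nodup := by
      rw [hnodupkeys]
      exact (PySem.Set.nodup_ofList nums).filter _
    have hitems := PySem.Dict.items_foldl_insert_fresh
      (((PySem.Set.ofList nums).filter (fun v => (List.count v nums : Int) == K)).map
        (fun v => (v, (List.count v nums : Int))))
      (fun p => p.1) (fun p => p.2) PySem.Dict.empty hfresh hnd
    show (_ : PySem.Dict Int Int).items.map (fun p => p.1) = _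
    have heq : (List.foldl (fun (d : PySem.Dict Int Int) (p : Int × Int) =>
          d.insert p.1 p.2) PySem.Dict.empty
        (((PySem.Set.ofList nums).filter (fun v => (List.count v nums : Int) == K)).map
          (fun v => (v, (List.count v nums : Int))))).items
        = PySem.Dict.empty.items ++ (((PySem.Set.ofList nums).filter
            (fun v => (List.count v nums : Int) == K)).map
              (fun v => (v, (List.count v nums : Int)))).map (fun p => (p.1, p.2)) := hitems
    rw [heq]
    have : PySem.Dict.empty.items = ([] : List (Int × Int)) := rfl
    rw [this, List.nil_append, List.map_map, List.map_map]
    simp [Function.comp_def]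
  rw [hkeys]
  -- range_indexes as a map
  rw [PySem.List.slice?_none_none_neg_one]
  simp only [Option.getD_some]
  rw [PySem.List.foldl_append_singleton_eq_map
    (fun value => ((nums.length : Int) -
        (((PySem.List.index? nums.reverse value).getD 0 : Nat) : Int)) -
      (((PySem.List.index? nums value).getD 0 : Nat) : Int))]
  rw [List.nil_append]
  -- identify the mapped list with pvM's list
  unfold pvM
  rw [← hKdef]
  have hfl : (pvL nums).filter (fun t => t.1 == K)
      = ((PySem.Set.ofList nums).filter
          (fun v => (List.count v nums : Int) == K)).map (pvStat nums) := by
    unfold pvL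
    rw [List.filter_map]
    rfl
  rw [hfl, List.map_map]
  refine congrArg (fun z => (PySem.List.min? z (fun x : Int => x)).getD 0) ?_
  refine List.map_congr_left (fun v _ => ?_)
  simp only [Function.comp_def, pvStat]
  push_cast
  ring

-- ===== VERDICT (by name: the statement is the Claim_ definition above) =====
theorem shortest_sublist_with_max_frequency_spec : Claim_equal_shortest_sublist_with_max_frequency := by
  intro nums _ hpre
  unfold Spec_shortest_sublist_with_max_frequency
  rw [portA_eq, portB_eq]
  have hLne : pvL nums ≠ [] := by
    obtain ⟨v, t, rfl⟩ := List.exists_cons_of_ne_nil hpre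
    unfold pvL
    intro h
    rw [List.map_eq_nil_iff] at h
    have : v ∈ PySem.Set.ofList (v :: t) := (PySem.Set.mem_ofList _ v).mpr (by simp)
    rw [h] at this
    exact absurd this (List.not_mem_nil)
  have hc : ∀ t ∈ pvL nums, (1 : Int) ≤ t.1 := by
    intro t ht
    obtain ⟨v, hv, rfl⟩ := List.mem_map.mp ht
    have hm : v ∈ nums := (PySem.Set.mem_ofList nums v).mp hv
    have : 0 < List.count v nums := List.count_pos_iff.mpr hm
    simp only [pvStat]
    omega
  rw [pvBestFold (pvL nums) hLne hc]
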